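-- pv_equiv track=rewrite | github.com/Nghia03092004/nghia03092004.github.io | project_euler_unified/problem_811/solution.py | count_suffix_xor_odd
-- ===== SOURCE A (Python) =====
-- def count_suffix_xor_odd(N, j, B):
--     """
--     Count k in [0..N] where XOR of bits j, j+1, ..., B-1 of k is 1.
--     Uses digit DP on bits from MSB down.
--     """
--     if j >= B:
--         return 0
--
--     # Extract bits of N
--     bits = []
--     for i in range(B - 1, -1, -1):
--         bits.append((N >> i) & 1)
--
--     # DP states: (position, tight, xor_parity_of_bits_from_j_onward_so_far)
--     # We process bits from MSB (position 0) to LSB (position B-1)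
--     # Position i corresponds to bit (B-1-i)
--     # We track parity of bits at positions >= j
--
--     # dp[tight][parity] = count
--     dp = {}
--     dp[(True, 0)] = 1  # start: tight, parity 0
--
--     for i in range(B):
--         actual_bit_pos = B - 1 - i
--         new_dp = {}
--         for (tight, par), cnt in dp.items():
--             max_d = bits[i] if tight else 1
--             for d in range(max_d + 1):
--                 new_tight = tight and (d == bits[i])
--                 new_par = par
--                 if actual_bit_pos >= j:
--                     new_par = par ^ d
--                 key = (new_tight, new_par)
--                 new_dp[key] = new_dp.get(key, 0) + cnt
--         dp = new_dp
--
--     # Count entries with parity = 1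
--     result = 0
--     for (tight, par), cnt in dp.items():
--         if par == 1:
--             result += cnt
--     return result
-- ===== SOURCE B (Python) =====
-- def count_suffix_xor_odd(N, j, B):
--     """
--     Count k in [0..N mod 2**B] where XOR of bits j..B-1 of k is 1.
--     Single arithmetic walk down N's low B bits (no DP table): when bit i of N
--     is 1, add the number of smaller values (bit i forced to 0, lower i bits
--     free) whose window parity is odd; finally count N itself via prefix_par.
--     """
--     if j >= B:
--         return 0
--     lo = max(j, 0)
--     prefix_par = 0
--     total = 0
--     for i in range(B - 1, -1, -1):
--         if (N >> i) & 1: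
--             if i > lo:
--                 # free window bits exist below: exactly half of 2**i completions are odd
--                 total += 1 << (i - 1)
--             elif prefix_par == 1:
--                 # no free window bit below: parity is fixed to prefix_par
--                 total += 1 << i
--             if i >= lo:
--                 prefix_par ^= 1
--     return total + prefix_par
-- ===== Notes on version B (the rewrite author's own statement) =====
-- stated objective: alternative
-- what changed: Replaced the tight/parity dictionary digit-DP with a single arithmetic walk over N's low B bits that directly adds, at each set bit, the closed-form count of completions with odd window parity (2^(i-1) when free window bits remain, else 2^i gated on the running prefix parity).
import Mathlib
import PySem

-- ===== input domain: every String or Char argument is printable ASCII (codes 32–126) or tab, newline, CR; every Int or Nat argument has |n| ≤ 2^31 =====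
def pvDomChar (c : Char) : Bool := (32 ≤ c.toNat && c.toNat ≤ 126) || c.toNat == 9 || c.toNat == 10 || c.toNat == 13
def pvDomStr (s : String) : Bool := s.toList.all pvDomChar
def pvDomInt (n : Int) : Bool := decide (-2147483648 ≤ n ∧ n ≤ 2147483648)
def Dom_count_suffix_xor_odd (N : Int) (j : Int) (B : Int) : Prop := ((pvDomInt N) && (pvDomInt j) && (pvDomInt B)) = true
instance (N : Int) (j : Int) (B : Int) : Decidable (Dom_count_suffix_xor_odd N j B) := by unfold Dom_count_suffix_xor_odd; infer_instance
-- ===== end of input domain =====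

-- B replaces A's tight/parity dictionary digit-DP by a single arithmetic walk over N's low
-- B bits that adds closed-form completion counts at each set bit (no dict per bit).

-- ===== PORT A =====
-- `N >> i` with `i ≥ 0` (true for every index the loops produce) is `N >>> i.toNat`,
-- exact Python arithmetic shift; `& 1` is PySem.Int.band.
def count_suffix_xor_odd (N : Int) (j : Int) (B : Int) : Int :=
  if j ≥ B then 0
  else
    let bits : List Int :=
      (PySem.List.pyRange (B - 1) (-1) (-1)).foldl
        (fun bits i => bits ++ [PySem.Int.band (N >>> i.toNat) 1]) []
    let dp : PySem.Dict (Bool × Int) Int := (PySem.Dict.empty).insert (true, 0) 1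
    let dp :=
      (PySem.List.pyRange 0 B 1).foldl (fun dp i =>
        let actual_bit_pos := B - 1 - i
        let new_dp :=
          dp.items.foldl (fun new_dp tpc =>
            let tight := tpc.1.1
            let par := tpc.1.2
            let cnt := tpc.2
            let max_d := if tight then PySem.List.pyGetD bits i 0 else 1
            (PySem.List.pyRange 0 (max_d + 1) 1).foldl (fun new_dp d =>
              let new_tight := tight && (d == PySem.List.pyGetD bits i 0)
              let new_par := if actual_bit_pos ≥ j then PySem.Int.bxor par d else par
              new_dp.insert (new_tight, new_par) (new_dp.getD (new_tight, new_par) 0 + cnt))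
              new_dp) PySem.Dict.empty
        new_dp) dp
    dp.items.foldl (fun result tpc => if tpc.1.2 == 1 then result + tpc.2 else result) 0

-- ===== PORT B =====
def count_suffix_xor_odd_alt (N : Int) (j : Int) (B : Int) : Int :=
  if j ≥ B then 0
  else
    let lo := max j 0
    let st :=
      (PySem.List.pyRange (B - 1) (-1) (-1)).foldl (fun (st : Int × Int) i =>
        let total := st.1
        let prefix_par := st.2
        if PySem.Int.band (N >>> i.toNat) 1 ≠ 0 then
          let total :=
            if i > lo then total + (1 : Int) <<< (i - 1).toNat
            else if prefix_par == 1 then total + (1 : Int) <<< i.toNat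
            else total
          let prefix_par := if i ≥ lo then PySem.Int.bxor prefix_par 1 else prefix_par
          (total, prefix_par)
        else (total, prefix_par)) (0, 0)
    st.1 + st.2

-- ===== PRECONDITION & SPEC =====
def Spec_count_suffix_xor_odd (N : Int) (j : Int) (B : Int) (out : Int) : Prop := out = count_suffix_xor_odd_alt N j B
instance (N : Int) (j : Int) (B : Int) (out : Int) : Decidable (Spec_count_suffix_xor_odd N j B out) := by unfold Spec_count_suffix_xor_odd; infer_instance

-- ===== CLAIM (what is proved, stated in full; the proofs are below) =====
def Claim_equal_count_suffix_xor_odd : Prop := ∀ (N : Int) (j : Int) (B : Int), Dom_count_suffix_xor_odd N j B → Spec_count_suffix_xor_odd N j B (count_suffix_xor_odd N j B)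

-- ===== LEMMAS AND PROOFS =====
set_option maxHeartbeats 2000000

-- the bit of N at (nonnegative) position p, as both ports compute it
def pvBit (N p : Int) : Int := PySem.Int.band (N >>> (p.toNat : Int)) 1

-- A's loop body for one position, abstracted over the position p and the bit b read there
def stepA (j p b : Int) (dp : PySem.Dict (Bool × Int) Int) : PySem.Dict (Bool × Int) Int :=
  dp.items.foldl (fun new_dp tpc =>
    let tight := tpc.1.1
    let par := tpc.1.2
    let cnt := tpc.2
    let max_d := if tight then b else 1
    (PySem.List.pyRange 0 (max_d + 1) 1).foldl (fun new_dp d =>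
      let new_tight := tight && (d == b)
      let new_par := if p ≥ j then PySem.Int.bxor par d else par
      new_dp.insert (new_tight, new_par) (new_dp.getD (new_tight, new_par) 0 + cnt))
      new_dp) PySem.Dict.empty

-- B's loop body (identical to the lambda in the port)
def bstep (N lo : Int) (st : Int × Int) (i : Int) : Int × Int :=
  let total := st.1
  let prefix_par := st.2
  if PySem.Int.band (N >>> (i.toNat : Int)) 1 ≠ 0 then
    let total :=
      if i > lo then total + (1 : Int) <<< (i - 1).toNat
      else if prefix_par == 1 then total + (1 : Int) <<< i.toNat
      else total
    let prefix_par := if i ≥ lo then PySem.Int.bxor prefix_par 1 else prefix_par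
    (total, prefix_par)
  else (total, prefix_par)

-- A's final summation
def sumOddD (d : PySem.Dict (Bool × Int) Int) : Int :=
  d.items.foldl (fun result tpc => if tpc.1.2 == 1 then result + tpc.2 else result) 0

-- A's dp states, abstractly: one tight entry (last), free entries `fs` = (parity, count) slots
def mkDP (pt : Int) (fs : List (Int × Int)) : PySem.Dict (Bool × Int) Int :=
  PySem.Dict.mk (fs.map (fun qc => ((false, qc.1), qc.2)) ++ [((true, pt), 1)])

def ShapeOK (fs : List (Int × Int)) : Prop :=
  fs = [] ∨ (∃ q c, (q = 0 ∨ q = 1) ∧ fs = [(q, c)]) ∨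
    (∃ q c c', (q = 0 ∨ q = 1) ∧ fs = [(q, c), (1 - q, c')])

def Valid (pt : Int) (fs : List (Int × Int)) : Prop := (pt = 0 ∨ pt = 1) ∧ ShapeOK fs

def sumfs (fs : List (Int × Int)) : Int := (fs.map (·.2)).sum
def odds (fs : List (Int × Int)) : Int := (fs.map (fun qc => if qc.1 = 1 then qc.2 else 0)).sum

-- model of one A step on the free slots: the free mass spreads, then (if the bit is 1)
-- the branch departing the tight path joins with weight 1 at parity pt
def spread (w : Bool) (fs : List (Int × Int)) : List (Int × Int) :=
  match fs with
  | [] => []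
  | [(q, c)] => if w then [(q, c), (1 - q, c)] else [(q, 2 * c)]
  | (q, c) :: (q', c') :: _ => if w then [(q, c + c'), (q', c + c')] else [(q, 2 * c), (q', 2 * c')]

def addUnit (pt : Int) (fs : List (Int × Int)) : List (Int × Int) :=
  match fs with
  | [] => [(pt, 1)]
  | [(q, c)] => if pt = q then [(q, c + 1)] else [(q, c), (pt, 1)]
  | (q, c) :: (q', c') :: _ => if pt = q then [(q, c + 1), (q', c')] else [(q, c), (q', c' + 1)]

def mstepFs (w : Bool) (b pt : Int) (fs : List (Int × Int)) : List (Int × Int) :=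
  if b = 1 then addUnit pt (spread w fs) else spread w fs

def mstepPt (w : Bool) (b pt : Int) : Int := if w ∧ b = 1 then 1 - pt else pt

-- the closed-form value B's running total has at a stage with n positions left
def Gval (lo : Int) (n : Nat) (fs : List (Int × Int)) : Int :=
  if (n : Int) > lo then sumfs fs * 2 ^ (n - 1) else odds fs * 2 ^ n

theorem pyR2 : PySem.List.pyRange 0 2 1 = [0, 1] := by decide
theorem pyR1 : PySem.List.pyRange 0 1 1 = [0] := by decide
theorem hx00 : PySem.Int.bxor 0 0 = 0 := by decide
theorem hx01 : PySem.Int.bxor 0 1 = 1 := by decide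
theorem hx10 : PySem.Int.bxor 1 0 = 1 := by decide
theorem hx11 : PySem.Int.bxor 1 1 = 0 := by decide

theorem pvBit01 (N p : Int) : pvBit N p = 0 ∨ pvBit N p = 1 := by
  unfold pvBit
  rw [PySem.Int.band_one]
  have h1 := PySem.Int.mod_nonneg (a := N >>> (p.toNat : Int)) (b := 2) (by norm_num)
  have h2 := PySem.Int.mod_lt (a := N >>> (p.toNat : Int)) (b := 2) (by norm_num)
  omega

theorem get?_mk_nil {κ ν : Type} [BEq κ] (k : κ) :
    (PySem.Dict.mk ([] : List (κ × ν))).get? k = none := rfl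

-- the central dict computation: one A step on a valid state is the model step
theorem stepA_mkDP (j p b pt : Int) (fs : List (Int × Int)) (w : Bool)
    (hw : p ≥ j ↔ w = true) (hb : b = 0 ∨ b = 1) (hV : Valid pt fs) :
    stepA j p b (mkDP pt fs) = mkDP (mstepPt w b pt) (mstepFs w b pt fs) := by
  obtain ⟨hpt, hs⟩ := hV
  have hwcases : (p ≥ j ∧ w = true) ∨ (¬ p ≥ j ∧ w = false) := by
    cases w
    · exact Or.inr ⟨fun h => by simpa using hw.mp h, rfl⟩
    · exact Or.inl ⟨hw.mpr rfl, rfl⟩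
  rcases hs with rfl | ⟨q, c, hq, rfl⟩ | ⟨q, c, c', hq, rfl⟩ <;>
    rcases hpt with rfl | rfl <;>
      (try rcases hq with rfl | rfl) <;>
        rcases hb with rfl | rfl <;>
          rcases hwcases with ⟨hpj, rfl⟩ | ⟨hpj, rfl⟩ <;>
            · apply PySem.Dict.ext
              norm_num [stepA, mkDP, mstepPt, mstepFs, spread, addUnit,
                pyR1, pyR2, hx00, hx01, hx10, hx11, hpj, List.foldl,
                PySem.Dict.items_insert, PySem.Dict.contains_insert, PySem.Dict.contains_mk,
                PySem.Dict.contains_empty, PySem.Dict.getD_insert, PySem.Dict.getD_empty,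
                PySem.Dict.getD_eq_get?_getD, PySem.Dict.get?_mk_cons, PySem.Dict.get?_empty,
                PySem.Dict.get?_insert, get?_mk_nil, PySem.Dict.empty]
              try (and_intros <;> ring)

theorem shape0 : ShapeOK [] := Or.inl rfl
theorem shape1 (c : Int) : ShapeOK [(0, c)] := Or.inr (Or.inl ⟨0, c, Or.inl rfl, rfl⟩)
theorem shape1' (c : Int) : ShapeOK [(1, c)] := Or.inr (Or.inl ⟨1, c, Or.inr rfl, rfl⟩)
theorem shape2 (c c' : Int) : ShapeOK [(0, c), (1, c')] :=
  Or.inr (Or.inr ⟨0, c, c', Or.inl rfl, by norm_num⟩)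
theorem shape2' (c c' : Int) : ShapeOK [(1, c), (0, c')] :=
  Or.inr (Or.inr ⟨1, c, c', Or.inr rfl, by norm_num⟩)

theorem valid_mstep (w : Bool) (b pt : Int) (fs : List (Int × Int))
    (hb : b = 0 ∨ b = 1) (hV : Valid pt fs) :
    Valid (mstepPt w b pt) (mstepFs w b pt fs) := by
  obtain ⟨hpt, hs⟩ := hV
  constructor
  · rcases hpt with rfl | rfl <;> cases w <;> rcases hb with rfl | rfl <;>
      simp [mstepPt]
  · rcases hs with rfl | ⟨q, c, hq, rfl⟩ | ⟨q, c, c', hq, rfl⟩ <;>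
      rcases hpt with rfl | rfl <;>
        (try rcases hq with rfl | rfl) <;>
          rcases hb with rfl | rfl <;>
            cases w <;>
              · norm_num [mstepFs, spread, addUnit]
                first
                  | exact shape0
                  | exact shape1 _
                  | exact shape1' _
                  | exact shape2 _ _
                  | exact shape2' _ _

theorem sumfs_mstep (w : Bool) (b pt : Int) (fs : List (Int × Int))
    (hs : ShapeOK fs) :
    sumfs (mstepFs w b pt fs) = 2 * sumfs fs + (if b = 1 then 1 else 0) := by
  rcases hs with rfl | ⟨q, c, hq, rfl⟩ | ⟨q, c, c', hq, rfl⟩ <;>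
    cases w <;>
      by_cases hb : b = 1 <;>
        (try rcases hq with rfl | rfl) <;>
          simp [mstepFs, spread, addUnit, sumfs, hb] <;> (try split_ifs) <;> (try simp [sumfs]) <;> try ring

theorem odds_mstep (w : Bool) (b pt : Int) (fs : List (Int × Int))
    (hpt : pt = 0 ∨ pt = 1) (hs : ShapeOK fs) :
    odds (mstepFs w b pt fs) =
      (if w then sumfs fs else 2 * odds fs) + (if b = 1 then pt else 0) := by
  rcases hs with rfl | ⟨q, c, hq, rfl⟩ | ⟨q, c, c', hq, rfl⟩ <;>
    rcases hpt with rfl | rfl <;>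
      cases w <;>
        by_cases hb : b = 1 <;>
          (try rcases hq with rfl | rfl) <;>
            simp [mstepFs, spread, addUnit, sumfs, odds, hb] <;> (try split_ifs) <;> (try simp [sumfs, odds]) <;> try omega

theorem G_step (lo : Int) (hlo : 0 ≤ lo) (n : Nat) (w : Bool)
    (hw : w = decide ((n : Int) ≥ lo)) (b pt : Int) (fs : List (Int × Int))
    (hb : b = 0 ∨ b = 1) (hpt : pt = 0 ∨ pt = 1) (hs : ShapeOK fs) :
    Gval lo n (mstepFs w b pt fs) =
      Gval lo (n + 1) fs +
        (if b = 1 then (if (n : Int) > lo then 2 ^ (n - 1) else if pt = 1 then 2 ^ n else 0)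
         else 0) := by
  have hsum := sumfs_mstep w b pt fs hs
  have hodd := odds_mstep w b pt fs hpt hs
  unfold Gval
  by_cases h1 : (n : Int) > lo
  · -- n > lo ≥ 0 so n ≥ 1; also n+1 > lo
    obtain ⟨m, rfl⟩ : ∃ m, n = m + 1 := ⟨n - 1, by omega⟩
    have h2 : ((m + 1 + 1 : Nat) : Int) > lo := by push_cast; push_cast at h1; omega
    rw [if_pos h1, if_pos h2, hsum]
    simp only [Nat.add_sub_cancel]
    rcases hb with rfl | rfl <;> (try norm_num [h1, pow_succ]) <;> (try ring) <;> try omega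
  · have h1' : (n : Int) ≤ lo := by omega
    by_cases h2 : ((n + 1 : Nat) : Int) > lo
    · -- n = lo exactly: window step, w = true
      have hw' : w = true := by rw [hw]; simp only [decide_eq_true_eq]; push_cast at h2; omega
      rw [if_neg h1, if_pos h2, hodd, hw']
      simp only [Nat.add_sub_cancel, if_true]
      rcases hb with rfl | rfl <;> rcases hpt with rfl | rfl <;>
        (try norm_num [h1, pow_succ]) <;> (try ring) <;> try omega
    · -- n < lo: outside the window, w = false
      have hw' : w = false := by rw [hw]; simp only [decide_eq_false_iff_not]; push_cast at h2; omega
      rw [if_neg h1, if_neg h2, hodd, hw']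
      simp only [Bool.false_eq_true, if_false]
      rcases hb with rfl | rfl <;> rcases hpt with rfl | rfl <;>
        (try norm_num [h1, pow_succ]) <;> (try ring) <;> try omega

theorem sumOddD_mkDP (pt : Int) (fs : List (Int × Int)) (hV : Valid pt fs) :
    sumOddD (mkDP pt fs) = odds fs + pt := by
  obtain ⟨hpt, hs⟩ := hV
  rcases hs with rfl | ⟨q, c, hq, rfl⟩ | ⟨q, c, c', hq, rfl⟩ <;>
    rcases hpt with rfl | rfl <;>
      (try rcases hq with rfl | rfl) <;>
        norm_num [sumOddD, mkDP, odds, List.foldl]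

theorem bxor_one (pt : Int) (hpt : pt = 0 ∨ pt = 1) : PySem.Int.bxor pt 1 = 1 - pt := by
  rcases hpt with rfl | rfl <;> decide

theorem shiftl_pred (n : Nat) : (1 : Int) <<< ((n : Int) - 1).toNat = 2 ^ (n - 1) := by
  have h : ((n : Int) - 1).toNat = n - 1 := by omega
  rw [Int.shiftLeft_eq, h, one_mul]

theorem shiftl_self (n : Nat) : (1 : Int) <<< ((n : Int)).toNat = 2 ^ n := by
  rw [Int.shiftLeft_eq, Int.toNat_natCast, one_mul]

-- one B step from the invariant state
theorem bstep_inv (lo : Int) (hlo0 : 0 ≤ lo) (N : Int) (n : Nat) (b pt : Int)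
    (fs : List (Int × Int)) (hbit : PySem.Int.band (N >>> (((n : Int)).toNat : Int)) 1 = b)
    (hb : b = 0 ∨ b = 1) (hpt : pt = 0 ∨ pt = 1) (hs : ShapeOK fs) :
    bstep N lo (Gval lo (n + 1) fs, pt) (n : Int) =
      (Gval lo n (mstepFs (decide ((n : Int) ≥ lo)) b pt fs),
       mstepPt (decide ((n : Int) ≥ lo)) b pt) := by
  have hG := G_step lo hlo0 n _ rfl b pt fs hb hpt hs
  unfold bstep
  simp only [hbit]
  rcases hb with rfl | rfl
  · rw [if_neg (by norm_num)]
    simp only [Prod.mk.injEq]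
    refine ⟨?_, ?_⟩
    · norm_num at hG
      exact hG.symm
    · simp [mstepPt]
  · rw [if_pos (by norm_num)]
    norm_num at hG
    simp only [Prod.mk.injEq]
    refine ⟨?_, ?_⟩
    · rw [hG, shiftl_pred, shiftl_self]
      by_cases h1 : (n : Int) > lo
      · rw [if_pos h1, if_pos h1]
      · rw [if_neg h1, if_neg h1]
        rcases hpt with rfl | rfl <;> norm_num
    · by_cases h2 : (n : Int) ≥ lo
      · rw [if_pos h2, bxor_one pt hpt]
        simp [mstepPt, h2]
      · rw [if_neg h2]
        simp [mstepPt, h2]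

-- the main simulation: A's remaining dict loop vs B's remaining arithmetic loop
theorem main_sim (N j lo : Int) (hlo : lo = max j 0) :
    ∀ (n : Nat) (pt : Int) (fs : List (Int × Int)), Valid pt fs →
      sumOddD ((PySem.List.pyRange ((n : Int) - 1) (-1) (-1)).foldl
          (fun dp p => stepA j p (pvBit N p) dp) (mkDP pt fs))
      = ((PySem.List.pyRange ((n : Int) - 1) (-1) (-1)).foldl (bstep N lo) (Gval lo n fs, pt)).1
        + ((PySem.List.pyRange ((n : Int) - 1) (-1) (-1)).foldl (bstep N lo) (Gval lo n fs, pt)).2 := by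
  have hlo0 : 0 ≤ lo := by omega
  intro n
  induction n with
  | zero =>
    intro pt fs hV
    rw [PySem.List.pyRange_neg_one_eq_nil (by norm_num)]
    simp only [List.foldl_nil]
    rw [sumOddD_mkDP pt fs hV]
    unfold Gval
    rw [if_neg (by push_cast; omega)]
    norm_num
  | succ m ih =>
    intro pt fs hV
    have hcast : ((m + 1 : Nat) : Int) - 1 = (m : Int) := by push_cast; ring
    rw [hcast, PySem.List.pyRange_neg_one_cons (by omega)]
    simp only [List.foldl_cons]
    have hw : ((m : Int) ≥ j) ↔ (decide ((m : Int) ≥ lo) = true) := by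
      simp only [decide_eq_true_eq]
      omega
    rw [stepA_mkDP j (m : Int) (pvBit N (m : Int)) pt fs _ hw (pvBit01 N (m : Int)) hV]
    rw [bstep_inv lo hlo0 N m (pvBit N (m : Int)) pt fs rfl (pvBit01 N (m : Int)) hV.1 hV.2]
    exact ih _ _ (valid_mstep _ _ _ _ (pvBit01 N (m : Int)) hV)

theorem posrange_eq (B : Int) :
    PySem.List.pyRange (B - 1) (-1) (-1) = PySem.List.pyRange ((B.toNat : Int) - 1) (-1) (-1) := by
  by_cases h : B ≤ 0
  · rw [PySem.List.pyRange_neg_one_eq_nil (by omega),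
      PySem.List.pyRange_neg_one_eq_nil (by omega)]
  · congr 1
    omega

theorem portB_eq (N j B : Int) (h : ¬ j ≥ B) :
    count_suffix_xor_odd_alt N j B =
      ((PySem.List.pyRange (B - 1) (-1) (-1)).foldl (bstep N (max j 0)) (0, 0)).1
      + ((PySem.List.pyRange (B - 1) (-1) (-1)).foldl (bstep N (max j 0)) (0, 0)).2 := by
  simp only [count_suffix_xor_odd_alt, if_neg h]
  first
    | rfl
    | (delta bstep; rfl)

theorem portA_eq (N j B : Int) (h : ¬ j ≥ B) :
    count_suffix_xor_odd N j B =
      sumOddD ((PySem.List.pyRange (B - 1) (-1) (-1)).foldl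
        (fun dp p => stepA j p (pvBit N p) dp) (PySem.Dict.mk [((true, 0), 1)])) := by
  have hd0 : ((PySem.Dict.empty : PySem.Dict (Bool × Int) Int).insert (true, 0) 1)
      = PySem.Dict.mk [((true, 0), 1)] := by decide
  simp only [count_suffix_xor_odd, if_neg h]
  rw [PySem.List.foldl_append_singleton_eq_map, hd0]
  show sumOddD ((PySem.List.pyRange 0 B 1).foldl
      (fun dp i => stepA j (B - 1 - i)
        (PySem.List.pyGetD ((PySem.List.pyRange (B - 1) (-1) (-1)).map
          (fun x => PySem.Int.band (N >>> (x.toNat : Int)) 1)) i 0) dp)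
      (PySem.Dict.mk [((true, 0), 1)])) = _
  apply congrArg
  have e1 : B - 1 - (-1) = B - 0 := by ring
  rw [PySem.List.pyRange_neg_one, e1, PySem.List.pyRange_one, List.foldl_map, List.foldl_map,
    List.map_map]
  apply PySem.List.foldl_congr_mem
  intro dp k hk
  have hk' : k < (B - 0).toNat := List.mem_range.mp hk
  simp only [zero_add, Function.comp_def]
  have hbit : PySem.List.pyGetD ((List.range (B - 0).toNat).map
        (fun x : Nat => PySem.Int.band (N >>> (((B - 1 - (x : Int)).toNat) : Int)) 1)) ((k : Nat) : Int) 0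
      = pvBit N (B - 1 - (k : Int)) := by
    rw [PySem.List.pyGetD_natCast]
    simp only [List.getD_eq_getElem?_getD, List.getElem?_map, List.getElem?_range, hk']
    rfl
  rw [hbit]

-- ===== VERDICT (by name: the statement is the Claim_ definition above) =====
theorem count_suffix_xor_odd_spec : Claim_equal_count_suffix_xor_odd := by
  intro N j B _hdom
  unfold Spec_count_suffix_xor_odd
  by_cases hjB : j ≥ B
  · simp [count_suffix_xor_odd, count_suffix_xor_odd_alt, hjB]
  · rw [portA_eq N j B hjB, portB_eq N j B hjB, posrange_eq]
    have hV : Valid 0 ([] : List (Int × Int)) := ⟨Or.inl rfl, Or.inl rfl⟩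
    have h := main_sim N j (max j 0) rfl B.toNat 0 [] hV
    have hG0 : Gval (max j 0) B.toNat [] = 0 := by
      unfold Gval sumfs odds
      split_ifs <;> simp
    rw [hG0] at h
    have hmk : mkDP 0 [] = PySem.Dict.mk [((true, 0), 1)] := by rfl
    rw [hmk] at h
    exact h
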